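-- pv_equiv track=rewrite | github.com/ArmanGrewal007/paathguide | paathguide/search/fuzzy_search.py | create_word_variants
-- ===== SOURCE A (Python) =====
-- from typing import List, Tuple, Optional
--
-- def create_word_variants(text: str) -> List[str]:
--     """Create variants by splitting and merging words."""
--     words = text.split()
--     variants = [text]  # Original text
--
--     # Word splitting variants (split each word into characters with spaces)
--     if words:
--         split_variant = ' '.join(' '.join(word) for word in words)
--         variants.append(split_variant)
--
--         # Word merging variant (no spaces)
--         merged_variant = ''.join(words)
--         variants.append(merged_variant)
--
--         # Partial merging (merge adjacent words)
--         if len(words) > 1: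
--             for i in range(len(words) - 1):
--                 partial_merged = words.copy()
--                 partial_merged[i] = partial_merged[i] + partial_merged[i + 1]
--                 del partial_merged[i + 1]
--                 variants.append(' '.join(partial_merged))
--
--     return variants
-- ===== SOURCE B (Python) =====
-- def create_word_variants(text: str):
--     """Create variants by splitting and merging words."""
--     words = text.split()
--     if not words:
--         return [text]
--     variants = [text,
--                 ' '.join(' '.join(word) for word in words),
--                 ''.join(words)]
--     # Partial merges: instead of copy/del/re-join of the word list, join once
--     # and delete each separating space of the joined string in turn.
--     joined = ' '.join(words)
--     p = 0
--     for w in words[:-1]: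
--         p += len(w)
--         variants.append(joined[:p] + joined[p + 1:])
--         p += 1
--     return variants
-- ===== Notes on version B (the rewrite author's own statement) =====
-- stated objective: simpler
-- what changed: Partial-merge variants are produced by joining the words once and deleting each separating space of the joined string in turn, instead of copying the word list, merging one pair, deleting an element and re-joining for every position.
import Mathlib
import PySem

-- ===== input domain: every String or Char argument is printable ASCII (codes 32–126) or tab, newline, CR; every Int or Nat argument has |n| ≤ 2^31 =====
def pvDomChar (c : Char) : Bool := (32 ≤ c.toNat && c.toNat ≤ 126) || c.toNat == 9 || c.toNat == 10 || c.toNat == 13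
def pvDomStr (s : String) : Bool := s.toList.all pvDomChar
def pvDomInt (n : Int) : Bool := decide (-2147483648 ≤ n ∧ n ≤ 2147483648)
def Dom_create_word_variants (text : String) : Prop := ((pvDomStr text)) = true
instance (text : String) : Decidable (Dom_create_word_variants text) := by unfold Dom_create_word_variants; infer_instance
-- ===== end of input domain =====

-- B builds the partial merges by joining the words once and deleting each separating
-- space of the joined string in turn, instead of copy/del/re-join of the word list (simpler).

-- ===== PORT A =====
def create_word_variants (text : String) : List String :=
  let words := PySem.Str.split₀ text
  let variants := [text]
  if words ≠ [] then
    let split_variant := PySem.Str.join " " (words.map (fun w => PySem.Str.join " " (w.toList.map (fun c => String.ofList [c]))))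
    let variants := variants ++ [split_variant]
    let merged_variant := PySem.Str.join "" words
    let variants := variants ++ [merged_variant]
    if 1 < words.length then
      (PySem.List.pyRange 0 ((words.length : Int) - 1)).foldl
        (fun acc i =>
          -- partial_merged = words.copy(); partial_merged[i] += partial_merged[i+1]; del partial_merged[i+1]
          let partial_merged := words
          let partial_merged := partial_merged.set i.toNat
            ((PySem.List.pyGet? partial_merged i).getD "" ++ (PySem.List.pyGet? partial_merged (i + 1)).getD "")
          let partial_merged := partial_merged.eraseIdx (i + 1).toNat
          acc ++ [PySem.Str.join " " partial_merged])
        variants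
    else variants
  else variants

-- ===== PORT B =====
-- the 'for w in words[:-1]' loop of Source B (state: offset p, accumulator variants)
def pvBLoop (joined : String) (ws : List String) (p : Int) (acc : List String) : List String :=
  match ws with
  | [] => acc
  | w :: ws' =>
      let p := p + PySem.Str.len w
      pvBLoop joined ws' (p + 1)
        (acc ++ [PySem.Str.slice joined none (some p) ++ PySem.Str.slice joined (some (p + 1)) none])

def create_word_variants_alt (text : String) : List String :=
  let words := PySem.Str.split₀ text
  if words = [] then [text]
  else
    let variants := [text,
      PySem.Str.join " " (words.map (fun w => PySem.Str.join " " (w.toList.map (fun c => String.ofList [c])))),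
      PySem.Str.join "" words]
    let joined := PySem.Str.join " " words
    pvBLoop joined words.dropLast 0 variants

-- ===== PRECONDITION & SPEC =====
def Spec_create_word_variants (text : String) (out : List String) : Prop := out = create_word_variants_alt text
instance (text : String) (out : List String) : Decidable (Spec_create_word_variants text out) := by unfold Spec_create_word_variants; infer_instance

-- ===== CLAIM (what is proved, stated in full; the proofs are below) =====
def Claim_equal_create_word_variants : Prop := ∀ (text : String), Dom_create_word_variants text → Spec_create_word_variants text (create_word_variants text)

-- ===== LEMMAS AND PROOFS =====

theorem pv_join_cons_ne {sep p : List Char} {ts : List (List Char)} (h : ts ≠ []) :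
    PySem.Chars.join sep (p :: ts) = p ++ sep ++ PySem.Chars.join sep ts := by
  cases ts with
  | nil => exact absurd rfl h
  | cons q rest => exact PySem.Chars.join_cons_cons sep p q rest

theorem pv_join_append {sep : List Char} {X Y : List (List Char)} (hX : X ≠ []) (hY : Y ≠ []) :
    PySem.Chars.join sep (X ++ Y) = PySem.Chars.join sep X ++ sep ++ PySem.Chars.join sep Y := by
  induction X with
  | nil => exact absurd rfl hX
  | cons p ps ih =>
    cases ps with
    | nil => simpa [PySem.Chars.join_singleton] using pv_join_cons_ne (sep := sep) (p := p) hY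
    | cons q qs =>
      rw [List.cons_append, pv_join_cons_ne (ts := (q :: qs) ++ Y) (by simp),
        ih (by simp), pv_join_cons_ne (ts := q :: qs) (by simp)]
      simp [List.append_assoc]

theorem pv_merge_join (sep : List Char) (pre : List (List Char)) (a b : List Char) (rest : List (List Char)) :
    PySem.Chars.join sep (pre ++ (a ++ b) :: rest)
      = PySem.Chars.join sep (pre ++ [a]) ++ PySem.Chars.join sep (b :: rest) := by
  induction pre with
  | nil =>
    cases rest with
    | nil => simp [PySem.Chars.join_singleton]
    | cons r rs =>
      rw [List.nil_append, PySem.Chars.join_cons_cons, List.nil_append, PySem.Chars.join_singleton,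
        PySem.Chars.join_cons_cons]
      simp [List.append_assoc]
  | cons p ps ih =>
    rw [List.cons_append, pv_join_cons_ne (ts := ps ++ (a ++ b) :: rest) (by simp),
      List.cons_append, pv_join_cons_ne (ts := ps ++ [a]) (by simp), ih]
    simp [List.append_assoc]

theorem pv_get_at : ∀ (pre : List String) (x : String) (l : List String),
    (pre ++ x :: l)[pre.length]? = some x := by
  intro pre
  induction pre with
  | nil => intro x l; simp
  | cons _ ps _ => intro x l; simp

theorem pv_get_at2 (pre : List String) (a b : String) (l : List String) :
    (pre ++ a :: b :: l)[pre.length + 1]? = some b := by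
  simp

theorem pv_set_at : ∀ (pre : List String) (x v : String) (l : List String),
    (pre ++ x :: l).set pre.length v = pre ++ v :: l := by
  intro pre
  induction pre with
  | nil => intro x v l; simp
  | cons p ps ih => intro x v l; simp [ih x v l]

theorem pv_erase_at : ∀ (pre : List String) (x b : String) (l : List String),
    (pre ++ x :: b :: l).eraseIdx (pre.length + 1) = pre ++ x :: l := by
  intro pre
  induction pre with
  | nil => intro x b l; simp [List.eraseIdx]
  | cons p ps ih => intro x b l; simpa [List.eraseIdx] using ih x b l

theorem pv_set_erase (pre : List String) (a b : String) (rs : List String) :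
    (((pre ++ a :: b :: rs).set pre.length
        (((pre ++ a :: b :: rs)[pre.length]?).getD "" ++ ((pre ++ a :: b :: rs)[pre.length + 1]?).getD "")).eraseIdx
      (pre.length + 1)) = pre ++ (a ++ b) :: rs := by
  rw [pv_get_at, pv_get_at2, Option.getD_some, Option.getD_some, pv_set_at, pv_erase_at]

-- the slice-merged string equals the list-merged string
theorem pv_head_eq (pre : List String) (a b : String) (rs : List String) (p : Int)
    (hp : p + (a.toList.length : Int)
        = ((PySem.Chars.join [' '] (pre.map String.toList ++ [a.toList])).length : Int)) :
    PySem.Str.slice (PySem.Str.join " " (pre ++ a :: b :: rs)) none (some (p + PySem.Str.len a))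
      ++ PySem.Str.slice (PySem.Str.join " " (pre ++ a :: b :: rs)) (some (p + PySem.Str.len a + 1)) none
    = PySem.Str.join " " (pre ++ (a ++ b) :: rs) := by
  apply String.toList_inj.mp
  have hsep : (" " : String).toList = [' '] := by decide
  rw [String.toList_append, PySem.Str.toList_slice, PySem.Str.toList_slice,
    PySem.Chars.slice_eq_listSlice, PySem.Chars.slice_eq_listSlice,
    PySem.Str.toList_join, PySem.Str.toList_join, hsep]
  rw [show pre ++ a :: b :: rs = (pre ++ [a]) ++ b :: rs by simp]
  rw [List.map_append, pv_join_append (by simp) (by simp)]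
  simp only [List.map_append, List.map_cons, List.map_nil]
  set P := PySem.Chars.join [' '] (pre.map String.toList ++ [a.toList]) with hP
  set S := PySem.Chars.join [' '] (b.toList :: rs.map String.toList) with hS
  have hplen : p + PySem.Str.len a = (P.length : Int) := by rw [PySem.Str.len_eq]; exact hp
  rw [hplen, show (P.length : Int) + 1 = ((P.length + 1 : Nat) : Int) by push_cast; ring,
    PySem.List.slice_to_natCast, PySem.List.slice_from_natCast]
  have htake : List.take P.length ((P ++ [' ']) ++ S) = P := by
    rw [List.append_assoc]; exact List.take_left' rfl
  have hdrop : List.drop (P.length + 1) ((P ++ [' ']) ++ S) = S := List.drop_left' (by simp)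
  rw [htake, hdrop]
  rw [show ((a ++ b) : String).toList = a.toList ++ b.toList from String.toList_append, pv_merge_join]

theorem pv_loop_eq : ∀ (rest pre : List String) (a : String) (p : Int),
    p + (a.toList.length : Int)
        = ((PySem.Chars.join [' '] (pre.map String.toList ++ [a.toList])).length : Int) →
    ∀ (acc : List String),
    pvBLoop (PySem.Str.join " " (pre ++ a :: rest)) ((a :: rest).dropLast) p acc
      = acc ++ (List.range rest.length).map (fun k =>
          PySem.Str.join " " (((pre ++ a :: rest).set (pre.length + k)
            ((((pre ++ a :: rest))[pre.length + k]?).getD ""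
              ++ (((pre ++ a :: rest))[pre.length + k + 1]?).getD "")).eraseIdx (pre.length + k + 1))) := by
  intro rest
  induction rest with
  | nil => intro pre a p hp acc; simp [pvBLoop]
  | cons b rs ih =>
    intro pre a p hp acc
    rw [List.dropLast_cons₂]
    simp only [pvBLoop]
    have hip : (p + PySem.Str.len a + 1) + (b.toList.length : Int)
        = ((PySem.Chars.join [' '] ((pre ++ [a]).map String.toList ++ [b.toList])).length : Int) := by
      have hX : PySem.Chars.join [' '] ((pre ++ [a]).map String.toList ++ [b.toList])
          = PySem.Chars.join [' '] ((pre ++ [a]).map String.toList) ++ [' ']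
            ++ PySem.Chars.join [' '] [b.toList] := pv_join_append (by simp) (by simp)
      rw [hX, PySem.Chars.join_singleton, PySem.Str.len_eq]
      simp only [List.map_append, List.map_cons, List.map_nil, List.length_append,
        List.length_cons, List.length_nil, String.length_toList] at hp ⊢
      push_cast at hp ⊢
      omega
    have hrec := ih (pre ++ [a]) b (p + PySem.Str.len a + 1) hip
      (acc ++ [PySem.Str.slice (PySem.Str.join " " (pre ++ a :: b :: rs)) none (some (p + PySem.Str.len a))
        ++ PySem.Str.slice (PySem.Str.join " " (pre ++ a :: b :: rs)) (some (p + PySem.Str.len a + 1)) none])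
    rw [show (pre ++ [a]) ++ b :: rs = pre ++ a :: b :: rs by simp] at hrec
    rw [hrec]
    -- now both sides are acc ++ …
    rw [List.length_cons, List.range_succ_eq_map, List.map_cons, List.map_map]
    have hhead : PySem.Str.slice (PySem.Str.join " " (pre ++ a :: b :: rs)) none (some (p + PySem.Str.len a))
        ++ PySem.Str.slice (PySem.Str.join " " (pre ++ a :: b :: rs)) (some (p + PySem.Str.len a + 1)) none
        = PySem.Str.join " " (((pre ++ a :: b :: rs).set (pre.length + 0)
            ((((pre ++ a :: b :: rs))[pre.length + 0]?).getD ""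
              ++ (((pre ++ a :: b :: rs))[pre.length + 0 + 1]?).getD "")).eraseIdx (pre.length + 0 + 1)) := by
      simp only [Nat.add_zero]
      rw [pv_set_erase]
      exact pv_head_eq pre a b rs p hp
    have hmap : (List.range rs.length).map (fun k =>
          PySem.Str.join " " (((pre ++ a :: b :: rs).set ((pre ++ [a]).length + k)
            ((((pre ++ a :: b :: rs))[(pre ++ [a]).length + k]?).getD ""
              ++ (((pre ++ a :: b :: rs))[(pre ++ [a]).length + k + 1]?).getD "")).eraseIdx ((pre ++ [a]).length + k + 1)))
        = (List.range rs.length).map ((fun k =>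
          PySem.Str.join " " (((pre ++ a :: b :: rs).set (pre.length + k)
            ((((pre ++ a :: b :: rs))[pre.length + k]?).getD ""
              ++ (((pre ++ a :: b :: rs))[pre.length + k + 1]?).getD "")).eraseIdx (pre.length + k + 1))) ∘ Nat.succ) := by
      apply List.map_congr_left
      intro k _
      have h1 : (pre ++ [a]).length + k = pre.length + Nat.succ k := by simp; omega
      simp only [Function.comp, h1]
    rw [hmap, hhead]
    simp

theorem create_word_variants_spec : Claim_equal_create_word_variants := by
  intro text _
  unfold Spec_create_word_variants create_word_variants create_word_variants_alt
  cases hw : PySem.Str.split₀ text with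
  | nil => simp
  | cons w ws =>
    cases ws with
    | nil => simp [pvBLoop]
    | cons b rs =>
      rw [if_pos (by simp : ¬(w :: b :: rs : List String) = [] )]
      rw [if_neg (by simp : ¬(w :: b :: rs : List String) = [] )]
      rw [if_pos (by simp : 1 < (w :: b :: rs).length)]
      rw [show (((w :: b :: rs).length : Int) - 1) = ((rs.length + 1 : Nat) : Int) by
        push_cast [List.length_cons]; ring]
      rw [PySem.List.pyRange_zero_natCast, PySem.List.foldl_append_singleton_eq_map, List.map_map]
      have hB := fun acc => pv_loop_eq (b :: rs) [] w 0
        (by simp [PySem.Chars.join_singleton]) acc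
      simp only [List.nil_append, List.length_nil, Nat.zero_add] at hB
      simp only []
      rw [hB]
      simp only [List.cons_append, List.nil_append]
      congr 1
      congr 1
      congr 1
      apply List.map_congr_left
      intro k hk
      have h1 : ((k : Int) + 1) = ((k + 1 : Nat) : Int) := by push_cast; ring
      simp only [Function.comp, h1, PySem.List.pyGet?_natCast, Int.toNat_natCast]
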